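-- pv_equiv track=rewrite | github.com/PolarBear85/freecodecamp-projects | Python/Daily_Code_Challenge/260317-get-milestone.py | get_milestone
-- ===== SOURCE A (Python) =====
-- def get_milestone(years):
--
--     milestones = [
--         (70, "Platinum"),
--         (60, "Diamond"),
--         (50, "Gold"),
--         (40, "Ruby"),
--         (25, "Silver"),
--         (10, "Tin"),
--         (5, "Wood"),
--         (1, "Paper")
--     ]
--
--     match = next((name for threshold, name in milestones if years >= threshold), "Newlyweds")
--
--     return match
-- ===== SOURCE B (Python) =====
-- import bisect
--
-- _THRESHOLDS = [1, 5, 10, 25, 40, 50, 60, 70]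
-- _NAMES = ["Paper", "Wood", "Tin", "Silver", "Ruby", "Gold", "Diamond", "Platinum"]
--
--
-- def get_milestone(years):
--     idx = bisect.bisect_right(_THRESHOLDS, years)
--     if idx == 0:
--         return "Newlyweds"
--     return _NAMES[idx - 1]
-- ===== Notes on version B (the rewrite author's own statement) =====
-- stated objective: alternative
-- what changed: Replaces the top-down linear scan over descending (threshold, name) pairs with a binary-search index (bisect_right) into an ascending thresholds list aligned with a names list.
import Mathlib
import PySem

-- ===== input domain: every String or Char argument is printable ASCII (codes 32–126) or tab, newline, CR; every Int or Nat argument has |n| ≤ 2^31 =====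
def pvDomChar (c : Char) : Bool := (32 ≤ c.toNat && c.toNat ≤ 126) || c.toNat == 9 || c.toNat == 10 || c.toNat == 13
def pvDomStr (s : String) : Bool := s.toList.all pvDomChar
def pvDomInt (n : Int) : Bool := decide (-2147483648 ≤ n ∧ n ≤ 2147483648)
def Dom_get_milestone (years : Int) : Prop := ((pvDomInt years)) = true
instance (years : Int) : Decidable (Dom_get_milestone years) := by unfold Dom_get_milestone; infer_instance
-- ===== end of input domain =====

-- B replaces A's linear top-down scan over descending (threshold, name) pairs with a
-- bisect_right binary search into an ascending thresholds list aligned with a names list (alternative decomposition, same cost at this fixed size).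


-- ===== PORT A =====
-- first element of the generator `(name for threshold, name in milestones if years >= threshold)`,
-- defaulted with "Newlyweds" by `next(..., default)`
def pvFirstMatch (years : Int) : List (Int × String) → String
  | [] => "Newlyweds"
  | (threshold, name) :: rest =>
      if years ≥ threshold then name else pvFirstMatch years rest

def get_milestone (years : Int) : String :=
  let milestones : List (Int × String) :=
    [(70, "Platinum"), (60, "Diamond"), (50, "Gold"), (40, "Ruby"),
     (25, "Silver"), (10, "Tin"), (5, "Wood"), (1, "Paper")]
  pvFirstMatch years milestones

-- ===== PORT B =====
-- bisect.bisect_right over a sorted list, transliterated as the standard lo/hi binary search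
def pvBisectRight (xs : List Int) (x : Int) (lo hi : Nat) : Nat :=
  if h : lo < hi then
    let mid := (lo + hi) / 2
    if x < xs.getD mid 0 then pvBisectRight xs x lo mid
    else pvBisectRight xs x (mid + 1) hi
  else lo
termination_by hi - lo
decreasing_by
  · omega
  · omega

def pvThresholds : List Int := [1, 5, 10, 25, 40, 50, 60, 70]
def pvNames : List String := ["Paper", "Wood", "Tin", "Silver", "Ruby", "Gold", "Diamond", "Platinum"]

def get_milestone_alt (years : Int) : String :=
  let idx := pvBisectRight pvThresholds years 0 pvThresholds.length
  if idx = 0 then "Newlyweds" else pvNames.getD (idx - 1) ""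

-- ===== PRECONDITION & SPEC =====
def Spec_get_milestone (years : Int) (out : String) : Prop := out = get_milestone_alt years
instance (years : Int) (out : String) : Decidable (Spec_get_milestone years out) := by unfold Spec_get_milestone; infer_instance

-- ===== CLAIM (what is proved, stated in full; the proofs are below) =====
def Claim_equal_get_milestone : Prop := ∀ (years : Int), Dom_get_milestone years → Spec_get_milestone years (get_milestone years)

-- ===== LEMMAS AND PROOFS =====

-- ===== VERDICT (by name: the statement is the Claim_ definition above) =====
theorem get_milestone_spec : Claim_equal_get_milestone := by
  intro years _
  unfold Spec_get_milestone get_milestone get_milestone_alt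
  simp only [pvFirstMatch, pvThresholds, pvNames, List.length]
  unfold pvBisectRight
  norm_num [List.getD]
  unfold pvBisectRight
  norm_num [List.getD]
  unfold pvBisectRight
  norm_num [List.getD]
  unfold pvBisectRight
  norm_num [List.getD]
  unfold pvBisectRight
  norm_num [List.getD]
  split_ifs <;> first | rfl | omega | contradiction
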